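-- pv_equiv track=rewrite | github.com/GedionT/Competitive-programming | Camp-1 - Month long/camp_week_3/contest/interesting_drink.py | find_possible_places
-- ===== SOURCE A (Python) =====
-- from typing import List
--
-- def find_possible_places(shop_prices: List[int], day: int) -> int:
--     """
--     Given a list of prices, find the possible places to buy the item
--     """
--
--     # approach one - brute force
--     # count = 0
--
--     # for p in shop_prices:
--     #     if day >= p:
--     #         count += 1
--
--     # return count
--
--     # approach two - binary search
--     left = 0
--     right = len(shop_prices) - 1
--
--     while left <= right:
--         mid = left + (right - left) // 2
--
--         if shop_prices[mid] <= day: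
--             left = mid + 1
--         else:
--             right = mid - 1
--
--     return left
-- ===== SOURCE B (Python) =====
-- from typing import List
--
-- def find_possible_places(shop_prices: List[int], day: int) -> int:
--     """
--     Given a list of prices, find the possible places to buy the item
--     """
--     # divide-and-conquer on list segments instead of an index loop
--     def go(seg: List[int]) -> int:
--         if not seg:
--             return 0
--         m = (len(seg) - 1) // 2
--         if seg[m] <= day:
--             return m + 1 + go(seg[m + 1:])
--         return go(seg[:m])
--
--     return go(shop_prices)
-- ===== Notes on version B (the rewrite author's own statement) =====
-- stated objective: alternative
-- what changed: Replaces A's iterative while-loop binary search over index bounds (left, right) with a divide-and-conquer recursion on list segments (slicing), keeping the exact same midpoint and comparison sequence so results match even on unsorted input.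
import Mathlib
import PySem

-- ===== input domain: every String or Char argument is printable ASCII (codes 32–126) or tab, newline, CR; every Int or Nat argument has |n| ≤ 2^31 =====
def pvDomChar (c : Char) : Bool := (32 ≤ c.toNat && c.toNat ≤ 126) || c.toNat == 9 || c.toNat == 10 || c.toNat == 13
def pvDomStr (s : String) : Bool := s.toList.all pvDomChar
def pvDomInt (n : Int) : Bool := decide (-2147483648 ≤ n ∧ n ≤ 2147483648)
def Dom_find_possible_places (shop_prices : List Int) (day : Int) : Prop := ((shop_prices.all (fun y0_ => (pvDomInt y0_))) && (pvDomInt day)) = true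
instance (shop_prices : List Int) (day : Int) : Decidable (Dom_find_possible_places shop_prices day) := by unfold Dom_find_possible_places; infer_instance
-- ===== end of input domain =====

-- B replaces A's iterative index-interval binary search by a divide-and-conquer
-- recursion on list segments (same comparisons, so it matches A even on unsorted input).

-- ===== PORT A =====
-- A's while-loop over the closed interval [left, right], `mid` written out inline;
-- the `none` branch of the lookup is unreachable (0 ≤ mid ≤ right < length on every
-- reachable state, proved in the lemmas below), matching Python's never-raising sp[mid].
def fppLoop (sp : List Int) (day : Int) (l r : Int) : Int :=
  if _h : l ≤ r then
    match PySem.List.pyGet? sp (l + PySem.Int.floordiv (r - l) 2) with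
    | some v =>
        if v ≤ day then fppLoop sp day (l + PySem.Int.floordiv (r - l) 2 + 1) r
        else fppLoop sp day l (l + PySem.Int.floordiv (r - l) 2 - 1)
    | none => l
  else l
termination_by (r + 1 - l).toNat
decreasing_by
  · rw [PySem.Int.floordiv_eq_ediv_of_pos (by omega : (0:Int) < 2)] at *; omega
  · rw [PySem.Int.floordiv_eq_ediv_of_pos (by omega : (0:Int) < 2)] at *; omega

def find_possible_places (shop_prices : List Int) (day : Int) : Int :=
  fppLoop shop_prices day 0 (shop_prices.length - 1)

-- ===== PORT B =====
-- B's recursive helper on a list segment, `m` written out inline; seg[m] with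
-- 0 ≤ m < seg.length is exactly List.getD.
def fppGo (day : Int) (seg : List Int) : Int :=
  if _hs : seg = [] then 0
  else
    if seg.getD ((seg.length - 1) / 2) 0 ≤ day then
      (((seg.length - 1) / 2 : Nat) : Int) + 1 + fppGo day (seg.drop ((seg.length - 1) / 2 + 1))
    else fppGo day (seg.take ((seg.length - 1) / 2))
termination_by seg.length
decreasing_by
  · have : seg.length ≠ 0 := by simpa [List.length_eq_zero_iff] using _hs
    simp; omega
  · have : seg.length ≠ 0 := by simpa [List.length_eq_zero_iff] using _hs
    simp [List.length_take]; omega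

def find_possible_places_alt (shop_prices : List Int) (day : Int) : Int :=
  fppGo day shop_prices

-- ===== PRECONDITION & SPEC =====
def Spec_find_possible_places (shop_prices : List Int) (day : Int) (out : Int) : Prop := out = find_possible_places_alt shop_prices day
instance (shop_prices : List Int) (day : Int) (out : Int) : Decidable (Spec_find_possible_places shop_prices day out) := by unfold Spec_find_possible_places; infer_instance

-- ===== CLAIM (what is proved, stated in full; the proofs are below) =====
def Claim_equal_find_possible_places : Prop := ∀ (shop_prices : List Int) (day : Int), Dom_find_possible_places shop_prices day → Spec_find_possible_places shop_prices day (find_possible_places shop_prices day)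

-- ===== LEMMAS AND PROOFS =====

lemma fppLoop_eq_go (sp : List Int) (day : Int) :
    ∀ (n : Nat) (l r : Int), 0 ≤ l → r < sp.length → (r + 1 - l).toNat = n →
      fppLoop sp day l r = l + fppGo day ((sp.drop l.toNat).take n) := by
  intro n
  induction n using Nat.strong_induction_on with
  | _ n ih =>
    intro l r hl hr hn
    by_cases hlr : l ≤ r
    · have hlen : ((sp.drop l.toNat).take n).length = n := by
        simp [List.length_take, List.length_drop]; omega
      have hseg : (sp.drop l.toNat).take n ≠ [] := by
        intro h; rw [h] at hlen; simp at hlen; omega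
      have hfd : PySem.Int.floordiv (r - l) 2 = (r - l) / 2 :=
        PySem.Int.floordiv_eq_ediv_of_pos (by omega)
      rw [fppLoop, fppGo, dif_pos hlr, dif_neg hseg, hfd, hlen]
      set mid := l + (r - l) / 2 with hmid
      have hmb : l ≤ mid ∧ mid ≤ r := by constructor <;> omega
      have hmN : mid.toNat = l.toNat + (n - 1) / 2 := by omega
      have hget : PySem.List.pyGet? sp mid = some (sp.getD mid.toNat 0) := by
        rw [List.getD_eq_getElem _ _ (by omega : mid.toNat < sp.length)]
        exact PySem.List.pyGet?_eq_some_getElem sp (by omega) (by omega)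
      have hsame : ((sp.drop l.toNat).take n).getD ((n - 1) / 2) 0 = sp.getD mid.toNat 0 := by
        rw [List.getD_eq_getElem _ _ (by omega : (n - 1) / 2 < ((sp.drop l.toNat).take n).length)]
        rw [List.getD_eq_getElem _ _ (by omega : mid.toNat < sp.length)]
        rw [List.getElem_take, List.getElem_drop]
        congr 1; omega
      rw [hget, hsame]
      by_cases hv : sp.getD mid.toNat 0 ≤ day
      · simp only [if_pos hv]
        rw [ih ((r + 1 - (mid + 1)).toNat) (by omega) (mid + 1) r (by omega) hr rfl]
        have hdrop : ((sp.drop l.toNat).take n).drop ((n - 1) / 2 + 1)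
            = (sp.drop (mid + 1).toNat).take ((r + 1 - (mid + 1)).toNat) := by
          rw [List.drop_take, List.drop_drop]
          have e1 : l.toNat + ((n - 1) / 2 + 1) = (mid + 1).toNat := by omega
          have e2 : n - ((n - 1) / 2 + 1) = (r + 1 - (mid + 1)).toNat := by omega
          rw [e1, e2]
        rw [hdrop]
        have hmi : mid = l + (((n - 1) / 2 : Nat) : Int) := by omega
        rw [hmi]; ring
      · simp only [if_neg hv]
        rw [ih ((mid - 1 + 1 - l).toNat) (by omega) l (mid - 1) hl (by omega) rfl]
        have htake : ((sp.drop l.toNat).take n).take ((n - 1) / 2)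
            = (sp.drop l.toNat).take ((mid - 1 + 1 - l).toNat) := by
          rw [List.take_take]
          congr 1; omega
        rw [htake]
    · have hn0 : n = 0 := by omega
      rw [fppLoop, dif_neg hlr, hn0, fppGo]
      simp

-- ===== VERDICT (by name: the statement is the Claim_ definition above) =====
theorem find_possible_places_spec : Claim_equal_find_possible_places := by
  intro sp day _
  unfold Spec_find_possible_places find_possible_places find_possible_places_alt
  rw [fppLoop_eq_go sp day sp.length 0 ((sp.length : Int) - 1) (by omega) (by omega) (by omega)]
  simp
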